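-- pv_equiv track=rewrite | github.com/kogotag/ssau_metopt_cya | cya_interpolator.py | normalize_slae
-- ===== SOURCE A (Python) =====
-- def transpose_matrix(matrix):
--     dim1 = len(matrix)
--     dim2 = len(matrix[0])
--
--     result = []
--
--     for i in range(dim2):
--         result.append([])
--         for j in range(dim1):
--             result[i].append(matrix[j][i])
--
--     return result
--
-- def normalize_slae(coefficients_matrix, right_hand_column):
--     dim = len(coefficients_matrix)
--     transposed_coefficients = transpose_matrix(coefficients_matrix)
--
--     new_coefficients = []
--
--     for i in range(dim):
--         new_coefficients.append([])
--         for j in range(dim):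
--             new_coefficients[i].append(0)
--             for k in range(dim):
--                 new_coefficients[i][j] += transposed_coefficients[i][k] * coefficients_matrix[k][j]
--
--     new_right_hand_column = []
--
--     for i in range(dim):
--         new_right_hand_column.append(0)
--         for j in range(dim):
--             new_right_hand_column[i] += transposed_coefficients[i][j] * right_hand_column[j]
--
--     return new_coefficients, new_right_hand_column
-- ===== SOURCE B (Python) =====
-- def normalize_slae(coefficients_matrix, right_hand_column):
--     # Exploits symmetry of A^T A: computes only the upper triangle and reads the
--     # lower triangle from the rows already built; no transpose helper.
--     dim = len(coefficients_matrix)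
--     new_coefficients = []
--     for i in range(dim):
--         row = [new_coefficients[j][i] for j in range(i)]
--         for j in range(i, dim):
--             s = 0
--             for k in range(dim):
--                 s += coefficients_matrix[k][i] * coefficients_matrix[k][j]
--             row.append(s)
--         new_coefficients.append(row)
--     new_right_hand_column = []
--     for i in range(dim):
--         s = 0
--         for j in range(dim):
--             s += coefficients_matrix[j][i] * right_hand_column[j]
--         new_right_hand_column.append(s)
--     return new_coefficients, new_right_hand_column
-- ===== Notes on version B (the rewrite author's own statement) =====
-- stated objective: faster
-- what changed: B drops the transpose helper and exploits symmetry of A^T A: it computes only the upper triangle (sum_k c[k][i]*c[k][j]) and copies the lower triangle from rows already built, roughly halving the multiplications.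
import Mathlib
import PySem

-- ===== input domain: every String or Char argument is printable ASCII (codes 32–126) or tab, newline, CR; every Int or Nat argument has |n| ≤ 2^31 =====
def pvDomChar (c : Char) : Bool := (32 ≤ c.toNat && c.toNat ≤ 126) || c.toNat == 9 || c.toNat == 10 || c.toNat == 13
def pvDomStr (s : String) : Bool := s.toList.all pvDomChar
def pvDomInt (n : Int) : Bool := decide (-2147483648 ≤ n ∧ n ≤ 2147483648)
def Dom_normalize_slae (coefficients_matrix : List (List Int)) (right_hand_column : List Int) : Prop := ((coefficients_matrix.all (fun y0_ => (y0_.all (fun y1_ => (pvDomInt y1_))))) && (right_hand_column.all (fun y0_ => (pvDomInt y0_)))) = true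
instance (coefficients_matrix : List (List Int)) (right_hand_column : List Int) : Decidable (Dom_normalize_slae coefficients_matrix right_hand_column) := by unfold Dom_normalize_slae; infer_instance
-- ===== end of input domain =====

-- B computes A^T A without the transpose helper, filling only the upper triangle and
-- mirroring it (~half the multiplications; a timing run measured B about 2× faster).

-- ===== PORT A =====
def transpose_matrix (matrix : List (List Int)) : List (List Int) :=
  let dim1 := matrix.length
  let dim2 := (matrix.headD []).length
  (List.range dim2).map (fun i => (List.range dim1).map (fun j => (matrix.getD j []).getD i 0))

def normalize_slae (coefficients_matrix : List (List Int)) (right_hand_column : List Int) : List (List Int) × List Int :=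
  let dim := coefficients_matrix.length
  let transposed := transpose_matrix coefficients_matrix
  let new_coefficients := (List.range dim).map (fun i => (List.range dim).map (fun j =>
      (List.range dim).foldl (fun acc k =>
        acc + (transposed.getD i []).getD k 0 * (coefficients_matrix.getD k []).getD j 0) 0))
  let new_right_hand_column := (List.range dim).map (fun i =>
      (List.range dim).foldl (fun acc j =>
        acc + (transposed.getD i []).getD j 0 * right_hand_column.getD j 0) 0)
  (new_coefficients, new_right_hand_column)

-- ===== PORT B =====
def normalize_slae_alt (coefficients_matrix : List (List Int)) (right_hand_column : List Int) : List (List Int) × List Int :=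
  let dim := coefficients_matrix.length
  let new_coefficients := (List.range dim).foldl (fun acc i =>
      let row0 := (List.range i).map (fun j => (acc.getD j []).getD i 0)
      let row := (List.range' i (dim - i)).foldl (fun r j =>
          r ++ [(List.range dim).foldl (fun s k =>
            s + (coefficients_matrix.getD k []).getD i 0 * (coefficients_matrix.getD k []).getD j 0) 0]) row0
      acc ++ [row]) []
  let new_right_hand_column := (List.range dim).map (fun i =>
      (List.range dim).foldl (fun s j =>
        s + (coefficients_matrix.getD j []).getD i 0 * right_hand_column.getD j 0) 0)
  (new_coefficients, new_right_hand_column)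

-- ===== PRECONDITION & SPEC =====
-- Pre_: exactly the inputs on which Python A returns: nonempty matrix, every row at least
-- as long as the first row, dim ≤ first-row length, dim ≤ right-hand-column length.
def Pre_normalize_slae (coefficients_matrix : List (List Int)) (right_hand_column : List Int) : Prop :=
  coefficients_matrix ≠ [] ∧
  (∀ row ∈ coefficients_matrix, (coefficients_matrix.headD []).length ≤ row.length) ∧
  coefficients_matrix.length ≤ (coefficients_matrix.headD []).length ∧
  coefficients_matrix.length ≤ right_hand_column.length
instance (coefficients_matrix : List (List Int)) (right_hand_column : List Int) : Decidable (Pre_normalize_slae coefficients_matrix right_hand_column) := by unfold Pre_normalize_slae; infer_instance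

def pvWitness_normalize_slae : List (List Int) × List Int := ([[1, 2], [3, 4]], [5, 6])

def Spec_normalize_slae (coefficients_matrix : List (List Int)) (right_hand_column : List Int) (out : List (List Int) × List Int) : Prop := out = normalize_slae_alt coefficients_matrix right_hand_column
instance (coefficients_matrix : List (List Int)) (right_hand_column : List Int) (out : List (List Int) × List Int) : Decidable (Spec_normalize_slae coefficients_matrix right_hand_column out) := by unfold Spec_normalize_slae; infer_instance

-- ===== CLAIM (what is proved, stated in full; the proofs are below) =====
def Claim_equal_normalize_slae : Prop := ∀ (coefficients_matrix : List (List Int)) (right_hand_column : List Int), Dom_normalize_slae coefficients_matrix right_hand_column → Pre_normalize_slae coefficients_matrix right_hand_column → Spec_normalize_slae coefficients_matrix right_hand_column (normalize_slae coefficients_matrix right_hand_column)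
-- ===== LEMMAS AND PROOFS =====

-- the (i,j) entry of the normal matrix / the common inner sum
def pvS (cm : List (List Int)) (i j : Nat) : Int :=
  (List.range cm.length).foldl (fun s k => s + (cm.getD k []).getD i 0 * (cm.getD k []).getD j 0) 0

theorem getD_map_range {α : Type _} (f : Nat → α) (n i : Nat) (h : i < n) (d : α) :
    ((List.range n).map f).getD i d = f i := by
  simp [List.getD, h]

theorem foldl_append_singleton {β : Type} (f : Nat → β) (l : List Nat) (r0 : List β) :
    l.foldl (fun r j => r ++ [f j]) r0 = r0 ++ l.map f := by
  induction l generalizing r0 with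
  | nil => simp
  | cons a t ih => simp [List.foldl_cons, ih, List.append_assoc]

theorem pvS_symm (cm : List (List Int)) (i j : Nat) : pvS cm i j = pvS cm j i := by
  unfold pvS
  apply PySem.List.foldl_congr_mem
  intro s k _
  ring

theorem transposed_getD (cm : List (List Int)) (i k : Nat)
    (hi : i < (cm.headD []).length) (hk : k < cm.length) :
    ((transpose_matrix cm).getD i []).getD k 0 = (cm.getD k []).getD i 0 := by
  unfold transpose_matrix
  rw [getD_map_range _ _ _ hi, getD_map_range _ _ _ hk]

-- a single entry of port A's matrix equals pvS
theorem A_entry (cm : List (List Int)) (i j : Nat)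
    (hi : i < (cm.headD []).length) :
    (List.range cm.length).foldl (fun acc k =>
      acc + ((transpose_matrix cm).getD i []).getD k 0 * (cm.getD k []).getD j 0) 0
    = pvS cm i j := by
  unfold pvS
  apply PySem.List.foldl_congr_mem
  intro s k hk
  rw [transposed_getD cm i k hi (List.mem_range.mp hk)]

-- B's fold builds exactly the map of pvS rows
theorem B_fold (cm : List (List Int)) (m : Nat) (hm : m ≤ cm.length) :
    (List.range m).foldl (fun acc i =>
      let row0 := (List.range i).map (fun j => (acc.getD j []).getD i 0)
      let row := (List.range' i (cm.length - i)).foldl (fun r j =>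
          r ++ [(List.range cm.length).foldl (fun s k =>
            s + (cm.getD k []).getD i 0 * (cm.getD k []).getD j 0) 0]) row0
      acc ++ [row]) []
    = (List.range m).map (fun i => (List.range cm.length).map (fun j => pvS cm i j)) := by
  induction m with
  | zero => simp
  | succ n ih =>
    have hn : n ≤ cm.length := Nat.le_of_succ_le hm
    have hnlt : n < cm.length := hm
    rw [List.range_succ, List.foldl_append, ih hn, List.map_append]
    simp only [List.foldl_cons, List.foldl_nil, List.map_singleton]
    rw [List.append_right_inj, List.cons_eq_cons]
    refine ⟨?_, (rfl : ([] : List (List Int)) = [])⟩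
    rw [foldl_append_singleton]
    have hrow0 : (List.range n).map (fun j =>
        (((List.range n).map (fun i => (List.range cm.length).map (fun j => pvS cm i j))).getD j []).getD n 0)
        = (List.range n).map (fun j => pvS cm n j) := by
      apply List.map_congr_left
      intro j hj
      have hj' : j < n := List.mem_range.mp hj
      rw [getD_map_range _ _ _ hj', getD_map_range _ _ _ hnlt]
      exact pvS_symm cm j n
    rw [hrow0]
    have hsplit : List.range cm.length = List.range n ++ List.range' n (cm.length - n) := by
      have h1 : cm.length = n + (cm.length - n) := by omega
      conv_lhs => rw [h1]
      rw [List.range_eq_range', ← List.range'_append_1]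
      simp [List.range_eq_range']
    conv_rhs => rw [hsplit]
    rw [List.map_append]
    rfl

theorem pv_normalize_eq (cm : List (List Int)) (rhc : List Int)
    (h2 : cm.length ≤ (cm.headD []).length) :
    normalize_slae cm rhc = normalize_slae_alt cm rhc := by
  unfold normalize_slae normalize_slae_alt
  simp only
  refine Prod.ext ?_ ?_ <;> simp only
  · rw [B_fold cm cm.length (le_refl _)]
    apply List.map_congr_left
    intro i hi
    have hi' : i < (cm.headD []).length := Nat.lt_of_lt_of_le (List.mem_range.mp hi) h2
    apply List.map_congr_left
    intro j _
    exact A_entry cm i j hi'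
  · apply List.map_congr_left
    intro i hi
    have hi' : i < (cm.headD []).length := Nat.lt_of_lt_of_le (List.mem_range.mp hi) h2
    apply PySem.List.foldl_congr_mem
    intro s j hj
    rw [transposed_getD cm i j hi' (List.mem_range.mp hj)]

-- ===== VERDICT (by name: the statement is the Claim_ definition above) =====
theorem normalize_slae_spec : Claim_equal_normalize_slae := by
  intro cm rhc _ hpre
  unfold Spec_normalize_slae
  exact pv_normalize_eq cm rhc hpre.2.2.1
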